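-- pv_equiv track=rewrite | github.com/guillsil/Algo1Essaya-Python | parcialitos/tercer_parcialito/221-Recirsion.py | cantidad_de_apariciones
-- ===== SOURCE A (Python) =====
-- def cantidad_de_apariciones(cadena):
--     # Caso base
--     if len(cadena) < 3:
--         return 0
--
--     # Caso recursivo
--     primer_caracter = cadena[0]
--     subcadena = cadena[2:]
--
--     if primer_caracter == subcadena[0]:
--         return 1 + cantidad_de_apariciones(subcadena)
--     else:
--         return cantidad_de_apariciones(subcadena)
-- ===== SOURCE B (Python) =====
-- def cantidad_de_apariciones(cadena):
--     sub = cadena[::2]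
--     return sum(1 if a == b else 0 for a, b in zip(sub, sub[1:]))
-- ===== Notes on version B (the rewrite author's own statement) =====
-- stated objective: simpler
-- what changed: Replaces the tail recursion over repeated 2-character slices by extracting the even-indexed subsequence cadena[::2] once and counting adjacent equal pairs in a single zip pass.
import Mathlib
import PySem

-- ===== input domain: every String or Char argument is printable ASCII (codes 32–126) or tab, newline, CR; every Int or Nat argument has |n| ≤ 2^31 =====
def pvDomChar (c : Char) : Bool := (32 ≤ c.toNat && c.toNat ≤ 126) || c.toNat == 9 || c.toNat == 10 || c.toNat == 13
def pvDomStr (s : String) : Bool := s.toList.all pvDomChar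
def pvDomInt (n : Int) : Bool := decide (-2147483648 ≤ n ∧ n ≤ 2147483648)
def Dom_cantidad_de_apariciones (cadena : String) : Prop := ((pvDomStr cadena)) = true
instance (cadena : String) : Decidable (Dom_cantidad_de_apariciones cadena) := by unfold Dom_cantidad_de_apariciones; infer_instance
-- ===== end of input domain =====

-- B extracts the even-indexed subsequence once and counts adjacent equal pairs in it (simpler, one pass), instead of A's recursion on 2-step slices.


-- ===== PORT A =====
-- literal transliteration of A's recursion, on the string's characters
def cantidad_de_apariciones_go (cs : List Char) : Int :=
  if cs.length < 3 then 0
  else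
    let primer_caracter := PySem.List.pyGetD cs 0 ' '          -- cadena[0]; in range (len ≥ 3)
    let subcadena := PySem.List.slice cs (some 2) none          -- cadena[2:]
    if primer_caracter = PySem.List.pyGetD subcadena 0 ' ' then -- subcadena[0]; in range (len ≥ 1)
      1 + cantidad_de_apariciones_go subcadena
    else
      cantidad_de_apariciones_go subcadena
termination_by cs.length
decreasing_by
  all_goals
    rw [PySem.List.slice_from cs (by omega : (0:Int) ≤ 2)]
    simp only [List.length_drop]
    omega

def cantidad_de_apariciones (cadena : String) : Int :=
  cantidad_de_apariciones_go cadena.toList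

-- ===== PORT B =====
def cantidad_de_apariciones_alt (cadena : String) : Int :=
  match PySem.List.slice? cadena.toList none none 2 with        -- sub = cadena[::2]; step 2 ≠ 0, never none
  | none => 0
  | some sub =>
      ((sub.zip (PySem.List.slice sub (some 1) none)).map       -- zip(sub, sub[1:])
        (fun p => if p.1 = p.2 then (1 : Int) else 0)).sum      -- sum(1 if a == b else 0 …)

-- ===== PRECONDITION & SPEC =====
def Spec_cantidad_de_apariciones (cadena : String) (out : Int) : Prop := out = cantidad_de_apariciones_alt cadena
instance (cadena : String) (out : Int) : Decidable (Spec_cantidad_de_apariciones cadena out) := by unfold Spec_cantidad_de_apariciones; infer_instance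

-- ===== CLAIM (what is proved, stated in full; the proofs are below) =====
def Claim_equal_cantidad_de_apariciones : Prop := ∀ (cadena : String), Dom_cantidad_de_apariciones cadena → Spec_cantidad_de_apariciones cadena (cantidad_de_apariciones cadena)

-- ===== LEMMAS AND PROOFS =====

-- the even-indexed subsequence, as a structural recursion (proof-side view of cadena[::2])
def pvEveryOther {α : Type} : List α → List α
  | [] => []
  | [a] => [a]
  | a :: _ :: rest => a :: pvEveryOther rest

-- proof-side view of B's pairwise pass (slice sub [1:] rewritten to tail)
def pvPairCount : List Char → Int
  | xs => ((xs.zip xs.tail).map (fun p => if p.1 = p.2 then (1 : Int) else 0)).sum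

lemma pvStride {α : Type} : ∀ (cs : List α),
    List.filterMap (fun k => cs[2*k]?) (List.range ((cs.length+1)/2)) = pvEveryOther cs
  | [] => by simp [pvEveryOther]
  | [a] => by simp [pvEveryOther, List.range_succ]
  | a :: b :: rest => by
      have h : ((a :: b :: rest).length + 1) / 2 = (rest.length + 1) / 2 + 1 := by
        simp only [List.length_cons]; omega
      rw [h, List.range_succ_eq_map, List.filterMap_cons, List.filterMap_map]
      simp only [Nat.mul_zero, List.getElem?_cons_zero]
      have h2 : ((fun k => (a :: b :: rest)[2*k]?) ∘ Nat.succ) = fun k => rest[2*k]? := by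
        funext k
        simp only [Function.comp]
        rw [show 2 * Nat.succ k = (2*k+1)+1 by omega]
        simp [List.getElem?_cons_succ]
      rw [h2, pvStride rest]
      rfl

lemma pvSlice?_two {α : Type} (cs : List α) : PySem.List.slice? cs none none 2 = some (pvEveryOther cs) := by
  rw [← pvStride cs]
  unfold PySem.List.slice? PySem.List.sliceIndices
  norm_num
  have hc : (if 0 < cs.length then (((cs.length:Int) + 2 - 1) / 2).toNat else 0) = (cs.length + 1) / 2 := by
    split_ifs with h
    · omega
    · omega
  rw [hc]
  apply List.filterMap_congr
  intro k _
  congr 1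

lemma pvAlt_eq (cadena : String) :
    cantidad_de_apariciones_alt cadena = pvPairCount (pvEveryOther cadena.toList) := by
  unfold cantidad_de_apariciones_alt
  rw [pvSlice?_two]
  simp [pvPairCount, PySem.List.slice_from_one]

lemma pvEveryOther_cons_head {α : Type} (c : α) (rest : List α) :
    pvEveryOther (c :: rest) = c :: (pvEveryOther (c :: rest)).tail := by
  match rest with
  | [] => rfl
  | d :: rest' => rfl

lemma pvGo_eq_pairCount : ∀ (cs : List Char), cantidad_de_apariciones_go cs = pvPairCount (pvEveryOther cs)
  | [] => by simp [cantidad_de_apariciones_go, pvEveryOther, pvPairCount]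
  | [a] => by simp [cantidad_de_apariciones_go, pvEveryOther, pvPairCount]
  | [a, b] => by simp [cantidad_de_apariciones_go, pvEveryOther, pvPairCount]
  | a :: b :: c :: rest => by
      have ih := pvGo_eq_pairCount (c :: rest)
      rw [cantidad_de_apariciones_go, if_neg (by simp only [List.length_cons]; omega)]
      simp only [PySem.List.slice_from _ (by omega : (0:Int) ≤ 2)]
      have hsub : (a :: b :: c :: rest).drop (2:Int).toNat = c :: rest := rfl
      rw [hsub]
      simp only [PySem.List.pyGetD_zero_cons]
      rw [show pvEveryOther (a :: b :: c :: rest) = a :: pvEveryOther (c :: rest) from rfl,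
        pvEveryOther_cons_head c rest]
      simp only [pvPairCount, List.zip_cons_cons, List.tail_cons, List.map_cons, List.sum_cons]
      rw [← pvEveryOther_cons_head c rest, ih]
      split_ifs with h
      · rfl
      · simp [pvPairCount]
termination_by cs => cs.length

-- ===== VERDICT (by name: the statement is the Claim_ definition above) =====
theorem cantidad_de_apariciones_spec : Claim_equal_cantidad_de_apariciones := by
  intro cadena _
  unfold Spec_cantidad_de_apariciones cantidad_de_apariciones
  rw [pvAlt_eq, pvGo_eq_pairCount]
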